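-- pv_equiv track=rewrite | github.com/ahape/advent-of-code | day_21/solve.py | part_2
-- ===== SOURCE A (Python) =====
-- def part_2(value, goal):
--   t = 19
--   m = [1, 2, 2]
--   y = 0
--   x = m[y % 3]
--   i = 1
--   while value > goal:
--     if not x:
--       value -= 20
--       y += 1
--       x = m[y % 3]
--     else:
--       x -= 1
--     i += 1
--     if i >= t:
--       break
--   return (i, value)
--
--
--   return res
-- ===== SOURCE B (Python) =====
-- def part_2(value, goal):
--   t = 19
--   m = [1, 2, 2]
--   i = 1
--   y = 0
--   while value > goal:
--     x = m[y % 3]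
--     for _ in range(x):
--       i += 1
--       if i >= t:
--         return (i, value)
--     value -= 20
--     y += 1
--     i += 1
--     if i >= t:
--       return (i, value)
--   return (i, value)
-- ===== Notes on version B (the rewrite author's own statement) =====
-- stated objective: alternative
-- what changed: A's flat while-loop state machine with a countdown register x is replaced by nested loops: an outer per-cycle loop that reads x = m[y % 3] fresh each cycle, an inner for-loop over range(x) doing the decrement steps with early return at the step cap, and a single subtract-20 step per cycle.
import Mathlib
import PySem

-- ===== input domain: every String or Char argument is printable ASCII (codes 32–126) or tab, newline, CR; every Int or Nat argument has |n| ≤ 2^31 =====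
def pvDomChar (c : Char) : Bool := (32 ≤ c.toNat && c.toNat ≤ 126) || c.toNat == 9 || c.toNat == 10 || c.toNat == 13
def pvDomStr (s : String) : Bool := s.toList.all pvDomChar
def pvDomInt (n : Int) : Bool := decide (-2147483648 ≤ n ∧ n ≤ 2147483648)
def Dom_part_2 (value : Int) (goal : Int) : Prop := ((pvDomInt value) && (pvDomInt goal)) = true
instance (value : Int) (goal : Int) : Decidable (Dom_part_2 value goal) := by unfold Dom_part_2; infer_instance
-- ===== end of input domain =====

-- B restructures A's flat state machine (with x as a countdown register) into nested loops:
-- an outer cycle loop reading x = m[y % 3] and an inner for-loop of x decrement steps; same cost,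
-- objective: alternative decomposition (return value identical; neither program mutates arguments).

-- ===== PORT A =====
-- the while loop of A: state (y, x, i, value); breaks when i reaches t = 19 after the increment
def part2LoopA (goal y x i value : Int) : Int × Int :=
  if value > goal then
    let s : Int × Int × Int :=            -- (value, y, x) after the branch
      if x = 0 then
        (value - 20, y + 1, ((PySem.List.pyGet? [1, 2, 2] (PySem.Int.mod (y + 1) 3)).getD 0))
      else (value, y, x - 1)
    let i' := i + 1
    if i' ≥ 19 then (i', s.1)
    else part2LoopA goal s.2.1 s.2.2 i' s.1
  else (i, value)
termination_by (19 - i).toNat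
decreasing_by omega

def part_2 (value : Int) (goal : Int) : Int × Int :=
  -- t = 19; m = [1,2,2]; y = 0; x = m[y % 3]; i = 1; while …
  part2LoopA goal 0 ((PySem.List.pyGet? [1, 2, 2] (PySem.Int.mod 0 3)).getD 0) 1 value

-- ===== PORT B =====
-- the inner 'for _ in range(x)' of B: .inl = early return (i, value), .inr = the updated i
def part2Inner (k : Nat) (i value : Int) : (Int × Int) ⊕ Int :=
  match k with
  | 0 => .inr i
  | k + 1 =>
    let i' := i + 1
    if i' ≥ 19 then .inl (i', value) else part2Inner k i' value

theorem part2Inner_inr_le (k : Nat) (i value j : Int)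
    (h : part2Inner k i value = .inr j) : i ≤ j := by
  induction k generalizing i with
  | zero => simp [part2Inner] at h; omega
  | succ k ih =>
    simp only [part2Inner] at h
    split at h
    · cases h
    · have := ih (i + 1) h; omega

-- the outer 'while value > goal' loop of B
def part2LoopB (goal value y i : Int) : Int × Int :=
  if value > goal then
    let x : Int := (PySem.List.pyGet? [1, 2, 2] (PySem.Int.mod y 3)).getD 0
    match hm : part2Inner x.toNat i value with
    | .inl r => r
    | .inr j =>
      let value' := value - 20
      let i' := j + 1
      if i' ≥ 19 then (i', value')
      else part2LoopB goal value' (y + 1) i'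
  else (i, value)
termination_by (19 - i).toNat
decreasing_by
  have := part2Inner_inr_le _ _ _ _ hm
  omega

def part_2_alt (value : Int) (goal : Int) : Int × Int :=
  part2LoopB goal value 0 1

-- ===== PRECONDITION & SPEC =====
def Spec_part_2 (value : Int) (goal : Int) (out : Int × Int) : Prop := out = part_2_alt value goal
instance (value : Int) (goal : Int) (out : Int × Int) : Decidable (Spec_part_2 value goal out) := by unfold Spec_part_2; infer_instance

-- ===== CLAIM (what is proved, stated in full; the proofs are below) =====
def Claim_equal_part_2 : Prop := ∀ (value : Int) (goal : Int), Dom_part_2 value goal → Spec_part_2 value goal (part_2 value goal)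

-- ===== LEMMAS AND PROOFS =====

def part2M (y : Int) : Int := (PySem.List.pyGet? [1, 2, 2] (PySem.Int.mod y 3)).getD 0

theorem part2M_cases (y : Int) : part2M y = 1 ∨ part2M y = 2 := by
  have h0 : (0:Int) ≤ PySem.Int.mod y 3 := PySem.Int.mod_nonneg y (by norm_num)
  have h3 : PySem.Int.mod y 3 < 3 := PySem.Int.mod_lt y (by norm_num)
  unfold part2M
  interval_cases h : (PySem.Int.mod y 3) <;> simp [PySem.List.pyGet?, PySem.List.pyIdx?]

theorem part2LoopB_inl (goal value y i : Int) (r : Int × Int) (hv : value > goal)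
    (hr : part2Inner ((PySem.List.pyGet? [1, 2, 2] (PySem.Int.mod y 3)).getD 0 : Int).toNat i value
            = .inl r) :
    part2LoopB goal value y i = r := by
  rw [part2LoopB]
  simp only [hv, if_pos]
  split <;> rename_i hm <;> rw [hr] at hm <;> cases hm <;> rfl

theorem part2LoopB_inr (goal value y i j : Int) (hv : value > goal)
    (hr : part2Inner ((PySem.List.pyGet? [1, 2, 2] (PySem.Int.mod y 3)).getD 0 : Int).toNat i value
            = .inr j) :
    part2LoopB goal value y i
      = if 19 ≤ j + 1 then (j + 1, value - 20)
        else part2LoopB goal (value - 20) (y + 1) (j + 1) := by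
  rw [part2LoopB]
  simp only [hv, if_pos]
  split <;> rename_i hm <;> rw [hr] at hm <;> cases hm <;> rfl

theorem part2LoopB_exit (goal value y i : Int) (hv : ¬ value > goal) :
    part2LoopB goal value y i = (i, value) := by
  rw [part2LoopB]; simp [hv]

theorem part2Loop_eq (goal : Int) (k : Nat) :
    ∀ (i y value : Int), (19 - i).toNat ≤ k →
      part2LoopA goal y (part2M y) i value = part2LoopB goal value y i := by
  induction k using Nat.strong_induction_on with
  | _ k ih =>
    intro i y value hk
    by_cases hv : value > goal
    · rcases part2M_cases y with h | h
      · -- x = m[y % 3] = 1 : one D-step, then the S-step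
        by_cases h1 : (19:Int) ≤ i + 1
        · rw [part2LoopB_inl goal value y i (i + 1, value) hv
              (by rw [show ((PySem.List.pyGet? [1, 2, 2] (PySem.Int.mod y 3)).getD 0 : Int) = part2M y from rfl, h]
                  simp [part2Inner, h1])]
          rw [part2LoopA]
          simp [hv, h, h1]
        · rw [part2LoopB_inr goal value y i (i + 1) hv
              (by rw [show ((PySem.List.pyGet? [1, 2, 2] (PySem.Int.mod y 3)).getD 0 : Int) = part2M y from rfl, h]
                  simp [part2Inner, h1])]
          rw [part2LoopA]
          simp only [hv, if_pos, if_neg h1, if_neg (show ¬ part2M y = 0 by omega)]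
          rw [part2LoopA]
          simp only [hv, if_pos, if_pos (show part2M y - 1 = 0 by omega)]
          by_cases h2 : (19:Int) ≤ i + 1 + 1
          · simp [h2]
          · simp only [if_neg h2]
            exact ih (k - 1) (by omega) (i + 1 + 1) (y + 1) (value - 20) (by omega)
      · -- x = m[y % 3] = 2 : two D-steps, then the S-step
        by_cases h1 : (19:Int) ≤ i + 1
        · rw [part2LoopB_inl goal value y i (i + 1, value) hv
              (by rw [show ((PySem.List.pyGet? [1, 2, 2] (PySem.Int.mod y 3)).getD 0 : Int) = part2M y from rfl, h]
                  simp [part2Inner, h1])]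
          rw [part2LoopA]
          simp [hv, h, h1]
        · by_cases h2 : (19:Int) ≤ i + 1 + 1
          · rw [part2LoopB_inl goal value y i (i + 1 + 1, value) hv
                (by rw [show ((PySem.List.pyGet? [1, 2, 2] (PySem.Int.mod y 3)).getD 0 : Int) = part2M y from rfl, h]
                    simp [part2Inner, h1, h2])]
            rw [part2LoopA]
            simp only [hv, if_pos, if_neg h1, if_neg (show ¬ part2M y = 0 by omega)]
            rw [part2LoopA]
            simp only [hv, if_pos, if_neg (show ¬ part2M y - 1 = 0 by omega), if_pos h2]
          · rw [part2LoopB_inr goal value y i (i + 1 + 1) hv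
                (by rw [show ((PySem.List.pyGet? [1, 2, 2] (PySem.Int.mod y 3)).getD 0 : Int) = part2M y from rfl, h]
                    simp [part2Inner, h1, h2])]
            rw [part2LoopA]
            simp only [hv, if_pos, if_neg h1, if_neg (show ¬ part2M y = 0 by omega)]
            rw [part2LoopA]
            simp only [hv, if_pos, if_neg h2, if_neg (show ¬ part2M y - 1 = 0 by omega)]
            rw [part2LoopA]
            simp only [hv, if_pos, if_pos (show part2M y - 1 - 1 = 0 by omega)]
            by_cases h3 : (19:Int) ≤ i + 1 + 1 + 1
            · simp [h3]
            · simp only [if_neg h3]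
              exact ih (k - 1) (by omega) (i + 1 + 1 + 1) (y + 1) (value - 20) (by omega)
    · rw [part2LoopB_exit goal value y i hv, part2LoopA]
      simp [hv]

-- ===== VERDICT (by name: the statement is the Claim_ definition above) =====
theorem part_2_spec : Claim_equal_part_2 := by
  intro value goal _
  unfold Spec_part_2 part_2 part_2_alt
  exact part2Loop_eq goal 18 1 0 value (by norm_num)
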